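-- pv_equiv track=rewrite | github.com/cadbee/Algorithms | Aho-Corasick/aho_corasick.py | sep_sample
-- ===== SOURCE A (Python) =====
-- def sep_sample(sample, wild):
--     # Удаляем из образца джокеры и формируем список паттернов
--     w_dict = {}
--     check = 0
--     part = ""
--     ind = 0
--     count = 0
--     for i in range(len(sample)):
--         if sample[i] != wild:
--             if check == 0:
--                 part = sample[i]
--                 ind = i
--                 check = 1
--                 if i == len(sample) - 1:
--                     count += 1
--                     w_dict.setdefault(part, [])
--                     w_dict.get(part).append(ind + 1)
--             else:
--                 part += sample[i]
--                 if i == len(sample) - 1: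
--                     count += 1
--                     w_dict.setdefault(part, [])
--                     w_dict.get(part).append(ind + 1)
--         else:
--             if check == 1:
--                 count += 1
--                 check = 0
--                 w_dict.setdefault(part, [])
--                 w_dict.get(part).append(ind + 1)
--             else:
--                 continue
--     return [w_dict, count]
-- ===== SOURCE B (Python) =====
-- def sep_sample(sample, wild):
--     # Two-pointer run extraction: slice out each maximal run of non-wildcard
--     # characters instead of building it char by char with a state flag.
--     w_dict = {}
--     count = 0
--     n = len(sample)
--     i = 0
--     while i < n:
--         if sample[i] == wild:
--             i += 1
--             continue
--         j = i + 1
--         while j < n and sample[j] != wild: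
--             j += 1
--         w_dict.setdefault(sample[i:j], []).append(i + 1)
--         count += 1
--         i = j
--     return [w_dict, count]
-- ===== Notes on version B (the rewrite author's own statement) =====
-- stated objective: simpler
-- what changed: Replaced the per-character state machine (check flag, incremental string concatenation, end-of-string special cases) with a two-pointer loop that finds each maximal non-wildcard run and slices it out in one step.
import Mathlib
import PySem

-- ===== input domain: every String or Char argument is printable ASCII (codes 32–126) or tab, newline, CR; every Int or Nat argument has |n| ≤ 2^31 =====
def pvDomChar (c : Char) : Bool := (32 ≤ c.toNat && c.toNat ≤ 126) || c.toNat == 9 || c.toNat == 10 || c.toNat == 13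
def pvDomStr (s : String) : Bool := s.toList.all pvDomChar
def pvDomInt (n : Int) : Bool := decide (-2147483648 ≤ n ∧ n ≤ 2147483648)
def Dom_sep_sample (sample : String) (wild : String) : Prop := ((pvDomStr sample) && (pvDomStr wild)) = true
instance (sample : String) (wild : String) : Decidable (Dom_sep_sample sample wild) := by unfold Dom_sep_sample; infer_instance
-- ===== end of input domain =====

-- B replaces A's per-character state-flag machine with a two-pointer loop that
-- slices out each maximal non-wildcard run at once (objective: simpler).


-- ===== PORT A =====
-- Loop state: (w_dict, check, part, ind, count).  'sample[i]' is a 1-character string,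
-- so 'sample[i] != wild' is ported as 'String.ofList [c] ≠ wild'.
-- 'w_dict.setdefault(part, []); w_dict.get(part).append(x)' is exactly Dict.modify part [] (· ++ [x]).
-- The index i comes from range(len(sample)), so it is always in range: cs.getD i ' ' = cs[i].
def sepStep (cs : List Char) (wild : String) (n : Nat)
    (st : PySem.Dict String (List Int) × Nat × String × Nat × Int) (i : Nat) :
    PySem.Dict String (List Int) × Nat × String × Nat × Int :=
  let (w, check, part, ind, count) := st
  let c := String.ofList [cs.getD i ' ']
  if c ≠ wild then
    if check = 0 then
      if i = n - 1 then
        (w.modify c [] (· ++ [(i : Int) + 1]), 1, c, i, count + 1)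
      else (w, 1, c, i, count)
    else
      if i = n - 1 then
        (w.modify (part ++ c) [] (· ++ [(ind : Int) + 1]), 1, part ++ c, ind, count + 1)
      else (w, 1, part ++ c, ind, count)
  else
    if check = 1 then
      (w.modify part [] (· ++ [(ind : Int) + 1]), 0, part, ind, count + 1)
    else (w, check, part, ind, count)

def sep_sample (sample : String) (wild : String) : (List (String × List Int)) × Int :=
  let cs := sample.toList
  let n := cs.length
  let st := (List.range n).foldl (sepStep cs wild n) (PySem.Dict.empty, 0, "", 0, 0)
  (st.1.items, st.2.2.2.2)

-- ===== PORT B =====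
-- Inner while loop of Source B: advance j while j < n and sample[j] != wild.
def findEnd (cs : List Char) (wild : String) (j : Nat) : Nat :=
  if h : j < cs.length then
    if String.ofList [cs[j]] ≠ wild then findEnd cs wild (j + 1) else j
  else j
termination_by cs.length - j

-- needed by altLoop's decreasing_by
theorem le_findEnd (cs : List Char) (wild : String) (j : Nat) : j ≤ findEnd cs wild j := by
  unfold findEnd
  split
  · split
    · exact Nat.le_trans (Nat.le_succ j) (le_findEnd cs wild (j + 1))
    · exact Nat.le_refl j
  · exact Nat.le_refl j
termination_by cs.length - j

-- Outer while loop of Source B; Source B's j and part are inlined.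
-- 'sample[i:j]' with 0 ≤ i ≤ j is exactly (cs.drop i).take (j - i).
def altLoop (cs : List Char) (wild : String) (w : PySem.Dict String (List Int))
    (count : Int) (i : Nat) : PySem.Dict String (List Int) × Int :=
  if h : i < cs.length then
    if String.ofList [cs[i]] = wild then altLoop cs wild w count (i + 1)
    else
      altLoop cs wild
        (w.modify (String.ofList ((cs.drop i).take (findEnd cs wild (i + 1) - i))) []
          (· ++ [(i : Int) + 1]))
        (count + 1) (findEnd cs wild (i + 1))
  else (w, count)
termination_by cs.length - i
decreasing_by
  · omega
  · have := le_findEnd cs wild (i + 1); omega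

def sep_sample_alt (sample : String) (wild : String) : (List (String × List Int)) × Int :=
  let r := altLoop sample.toList wild PySem.Dict.empty 0 0
  (r.1.items, r.2)

-- ===== PRECONDITION & SPEC =====
def Spec_sep_sample (sample : String) (wild : String) (out : (List (String × List Int)) × Int) : Prop := out = sep_sample_alt sample wild
instance (sample : String) (wild : String) (out : (List (String × List Int)) × Int) : Decidable (Spec_sep_sample sample wild out) := by unfold Spec_sep_sample; infer_instance

-- ===== CLAIM (what is proved, stated in full; the proofs are below) =====
def Claim_equal_sep_sample : Prop := ∀ (sample : String) (wild : String), Dom_sep_sample sample wild → Spec_sep_sample sample wild (sep_sample sample wild)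

-- ===== LEMMAS AND PROOFS =====

-- projection of A's loop state to the returned pair
def pvProj (st : PySem.Dict String (List Int) × Nat × String × Nat × Int) :
    PySem.Dict String (List Int) × Int := (st.1, st.2.2.2.2)

-- equation lemmas for findEnd
theorem findEnd_stop (cs : List Char) (wild : String) (j : Nat) (h : ¬ j < cs.length) :
    findEnd cs wild j = j := by
  unfold findEnd; simp [h]

theorem findEnd_wild (cs : List Char) (wild : String) (j : Nat) (h : j < cs.length)
    (hw : String.ofList [cs[j]] = wild) : findEnd cs wild j = j := by
  unfold findEnd; simp [h, hw]

theorem findEnd_step (cs : List Char) (wild : String) (j : Nat) (h : j < cs.length)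
    (hw : ¬ String.ofList [cs[j]] = wild) : findEnd cs wild j = findEnd cs wild (j + 1) := by
  conv_lhs => unfold findEnd
  simp [h, hw]

-- equation lemmas for altLoop
theorem altLoop_stop (cs : List Char) (wild : String) (w : PySem.Dict String (List Int))
    (count : Int) (i : Nat) (h : ¬ i < cs.length) : altLoop cs wild w count i = (w, count) := by
  unfold altLoop; simp [h]

theorem altLoop_wild (cs : List Char) (wild : String) (w : PySem.Dict String (List Int))
    (count : Int) (i : Nat) (h : i < cs.length) (hw : String.ofList [cs[i]] = wild) :
    altLoop cs wild w count i = altLoop cs wild w count (i + 1) := by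
  conv_lhs => unfold altLoop
  simp [h, hw]

theorem altLoop_run (cs : List Char) (wild : String) (w : PySem.Dict String (List Int))
    (count : Int) (i : Nat) (h : i < cs.length) (hw : ¬ String.ofList [cs[i]] = wild) :
    altLoop cs wild w count i =
      altLoop cs wild
        (w.modify (String.ofList ((cs.drop i).take (findEnd cs wild (i + 1) - i))) []
          (· ++ [(i : Int) + 1]))
        (count + 1) (findEnd cs wild (i + 1)) := by
  conv_lhs => unfold altLoop
  simp [h, hw]

-- the run sample[i:i+1] is the single character
theorem run_single (cs : List Char) (i : Nat) (hi : i < cs.length) :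
    (cs.drop i).take (i + 1 - i) = [cs[i]] := by
  simp [List.take_add_one, List.getElem?_drop, List.getElem?_eq_getElem hi,
    show i + 1 - i = 0 + 1 by omega]

-- extending the run sample[i:j] by one character
theorem sRun_extend (cs : List Char) (i j : Nat) (hij : i ≤ j) (hj : j < cs.length) :
    String.ofList ((cs.drop i).take (j - i)) ++ String.ofList [cs[j]] =
    String.ofList ((cs.drop i).take (j + 1 - i)) := by
  rw [← String.ofList_append]
  congr 1
  have h1 : cs[j] = (cs.drop i)[j - i]'(by simp; omega) := by
    simp [List.getElem_drop]; congr 1; omega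
  rw [h1, List.take_append_getElem]
  congr 1
  omega

-- The main simulation: A's fold from position pos equals B's loop from pos,
-- in both of A's flag states (check = 0 outside a run, check = 1 inside the run sample[i:j]).
theorem sim (cs : List Char) (wild : String) :
    ∀ d : Nat,
      (∀ (i : Nat) (w : PySem.Dict String (List Int)) (count : Int) (p : String) (ind : Nat),
        cs.length - i = d →
        pvProj ((List.range' i (cs.length - i)).foldl (sepStep cs wild cs.length)
          (w, 0, p, ind, count)) = altLoop cs wild w count i) ∧
      (∀ (j i : Nat) (w : PySem.Dict String (List Int)) (count : Int),
        i < j → j < cs.length → cs.length - j = d →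
        pvProj ((List.range' j (cs.length - j)).foldl (sepStep cs wild cs.length)
          (w, 1, String.ofList ((cs.drop i).take (j - i)), i, count)) =
        altLoop cs wild
          (w.modify (String.ofList ((cs.drop i).take (findEnd cs wild j - i))) []
            (· ++ [(i : Int) + 1]))
          (count + 1) (findEnd cs wild j)) := by
  intro d
  induction d using Nat.strong_induction_on with
  | _ d IH =>
    constructor
    · -- check = 0 state
      intro i w count p ind hd
      by_cases hi : i < cs.length
      · have hget : cs[i]?.getD ' ' = cs[i] := by simp [List.getElem?_eq_getElem hi]
        rw [show cs.length - i = (cs.length - (i + 1)) + 1 by omega,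
          List.range'_succ, List.foldl_cons]
        by_cases hw : String.ofList [cs[i]] = wild
        · -- wildcard, check = 0: state unchanged, continue
          have hstep : sepStep cs wild cs.length (w, 0, p, ind, count) i
              = (w, 0, p, ind, count) := by simp [sepStep, hget, hw]
          rw [hstep, altLoop_wild cs wild w count i hi hw]
          exact (IH (cs.length - (i + 1)) (by omega)).1 (i + 1) w count p ind rfl
        · rw [altLoop_run cs wild w count i hi hw]
          by_cases hl : i = cs.length - 1
          · -- last character: A appends immediately
            have hstep : sepStep cs wild cs.length (w, 0, p, ind, count) i
                = (w.modify (String.ofList [cs[i]]) [] (· ++ [(i : Int) + 1]), 1,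
                    String.ofList [cs[i]], i, count + 1) := by
              simp only [sepStep, List.getD_eq_getElem?_getD]
              rw [hget]
              simp [hl]
              exact hl ▸ hw
            have he : findEnd cs wild (i + 1) = i + 1 :=
              findEnd_stop cs wild (i + 1) (by omega)
            rw [hstep, show cs.length - (i + 1) = 0 by omega]
            rw [he, run_single cs i hi,
              altLoop_stop cs wild _ (count + 1) (i + 1) (by omega)]
            rfl
          · -- run starts and continues: switch to the check = 1 lemma at j = i + 1
            have hstep : sepStep cs wild cs.length (w, 0, p, ind, count) i
                = (w, 1, String.ofList [cs[i]], i, count) := by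
              simp [sepStep, hget, hw, hl]
            have h2 := (IH (cs.length - (i + 1)) (by omega)).2 (i + 1) i w count
              (by omega) (by omega) rfl
            rw [run_single cs i hi] at h2
            rw [hstep, h2]
      · -- loop finished
        rw [show cs.length - i = 0 by omega]
        rw [altLoop_stop cs wild w count i hi]
        rfl
    · -- check = 1 state, part = sample[i:j]
      intro j i w count hij hj hd
      have hget : cs[j]?.getD ' ' = cs[j] := by simp [List.getElem?_eq_getElem hj]
      rw [show cs.length - j = (cs.length - (j + 1)) + 1 by omega,
        List.range'_succ, List.foldl_cons]
      by_cases hw : String.ofList [cs[j]] = wild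
      · -- wildcard ends the run: A appends now, B's findEnd stopped at j
        have hstep : sepStep cs wild cs.length
              (w, 1, String.ofList ((cs.drop i).take (j - i)), i, count) j
            = (w.modify (String.ofList ((cs.drop i).take (j - i))) [] (· ++ [(i : Int) + 1]), 0,
                String.ofList ((cs.drop i).take (j - i)), i, count + 1) := by
          simp [sepStep, hget, hw]
        rw [hstep, findEnd_wild cs wild j hj hw,
          altLoop_wild cs wild _ (count + 1) j hj hw]
        exact (IH (cs.length - (j + 1)) (by omega)).1 (j + 1) _ (count + 1) _ i rfl
      · rw [findEnd_step cs wild j hj hw]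
        by_cases hl : j = cs.length - 1
        · -- last character extends the run; A appends at the end of the loop
          have hstep : sepStep cs wild cs.length
                (w, 1, String.ofList ((cs.drop i).take (j - i)), i, count) j
              = (w.modify (String.ofList ((cs.drop i).take (j - i)) ++ String.ofList [cs[j]]) []
                  (· ++ [(i : Int) + 1]), 1,
                  String.ofList ((cs.drop i).take (j - i)) ++ String.ofList [cs[j]], i,
                  count + 1) := by
            simp only [sepStep, List.getD_eq_getElem?_getD]
            rw [hget]
            simp [hl]
            exact hl ▸ hw
          have he : findEnd cs wild (j + 1) = j + 1 :=
            findEnd_stop cs wild (j + 1) (by omega)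
          rw [hstep, sRun_extend cs i j (by omega) hj,
            show cs.length - (j + 1) = 0 by omega, he,
            altLoop_stop cs wild _ (count + 1) (j + 1) (by omega)]
          rfl
        · -- run continues
          have hstep : sepStep cs wild cs.length
                (w, 1, String.ofList ((cs.drop i).take (j - i)), i, count) j
              = (w, 1, String.ofList ((cs.drop i).take (j - i)) ++ String.ofList [cs[j]], i,
                  count) := by
            simp [sepStep, hget, hw, hl]
          rw [hstep, sRun_extend cs i j (by omega) hj]
          exact (IH (cs.length - (j + 1)) (by omega)).2 (j + 1) i w count
            (by omega) (by omega) rfl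

-- ===== VERDICT (by name: the statement is the Claim_ definition above) =====
theorem sep_sample_spec : Claim_equal_sep_sample := by
  intro sample wild _
  unfold Spec_sep_sample sep_sample sep_sample_alt
  have h := (sim sample.toList wild (sample.toList.length - 0)).1 0
    PySem.Dict.empty 0 "" 0 rfl
  rw [← List.range_eq_range'] at h
  simp only [Nat.sub_zero] at h
  rw [← h]
  rfl
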